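-- pv_equiv track=rewrite | github.com/AliKhanat88/codeforces | new_2024 batch/exams.py | check
-- ===== SOURCE A (Python) =====
-- def check(arr, arr_m, last):
--     arr = arr[:]
--
--     dict_index = {}
--
--     cur = 0
--     for i in range(last+1):
--         if arr[i] != 0:
--             if dict_index.get(arr[i], None) != None:
--                 arr[dict_index[arr[i]]] = 0
--             dict_index[arr[i]] = i
--
--     for i in range(last+1):
--         if arr[i] == 0:
--             cur += 1
--         else:
--             if cur < arr_m[arr[i]-1]:
--                 return False
--             else:
--                 cur = cur - arr_m[arr[i]-1]
--     return True
-- ===== SOURCE B (Python) =====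
-- def check(arr, arr_m, last):
--     # Hall-type feasibility check: only the last occurrence of each exam value
--     # counts; for the effective exams taken in position order, the days before
--     # each exam that are not themselves exam days must cover the cumulative
--     # preparation requirement.  No per-day simulation and no copy of arr.
--     last_occ = {}
--     for i in range(last + 1):
--         if arr[i] != 0:
--             last_occ[arr[i]] = i
--     need = 0
--     for k, (pos, v) in enumerate(sorted((i, v) for v, i in last_occ.items())):
--         need += arr_m[v - 1]
--         if pos - k < need:
--             return False
--     return True
-- ===== Notes on version B (the rewrite author's own statement) =====
-- stated objective: alternative
-- what changed: A copies arr, zeroes out superseded occurrences via a value-to-index dict, then simulates every day with a free-day accumulator cur; B never copies or simulates days: it builds a last-occurrence dict, sorts the effective exams by day, and checks the Hall-type cumulative inequality pos - k >= need over the exams only.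
-- outside the precondition, e.g. on check([1, 5], [2], 1): A returns False, B returns False
import Mathlib
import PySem

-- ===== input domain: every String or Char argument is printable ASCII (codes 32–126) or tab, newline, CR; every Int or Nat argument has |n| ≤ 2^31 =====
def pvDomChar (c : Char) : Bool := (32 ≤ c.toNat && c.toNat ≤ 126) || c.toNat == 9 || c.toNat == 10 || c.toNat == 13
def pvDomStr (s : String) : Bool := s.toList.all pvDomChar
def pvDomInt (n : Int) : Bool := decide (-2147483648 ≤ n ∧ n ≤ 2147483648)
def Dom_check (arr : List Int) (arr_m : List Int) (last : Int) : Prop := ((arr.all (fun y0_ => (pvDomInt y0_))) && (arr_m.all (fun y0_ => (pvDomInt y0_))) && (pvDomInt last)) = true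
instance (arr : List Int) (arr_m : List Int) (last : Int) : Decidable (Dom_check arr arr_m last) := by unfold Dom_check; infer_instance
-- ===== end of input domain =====

-- B replaces A's copy-zero-and-simulate approach by a Hall-type feasibility check over the
-- sorted effective exams only (alternative algorithm); the equivalence is about the return
-- value (A mutates only its local copy of arr).

-- ===== PORT A =====
-- first loop: for i in range(last+1): if arr[i] != 0: (zero out previous occurrence, record index)
-- pyGetD/pySetD defaults are only reached where Python would raise IndexError (outside Pre_check)
def checkLoop1 (idxs : List Int) (a : List Int) (d : PySem.Dict Int Int) :
    List Int × PySem.Dict Int Int :=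
  match idxs with
  | [] => (a, d)
  | i :: rest =>
    let v := PySem.List.pyGetD a i 0
    if v ≠ 0 then
      let a' := match d.get? v with
        | some j => PySem.List.pySetD a j 0
        | none => a
      checkLoop1 rest a' (d.insert v i)
    else checkLoop1 rest a d

-- second loop: cur accumulator with early return False
def checkLoop2 (idxs : List Int) (a : List Int) (arr_m : List Int) (cur : Int) : Bool :=
  match idxs with
  | [] => true
  | i :: rest =>
    if PySem.List.pyGetD a i 0 = 0 then checkLoop2 rest a arr_m (cur + 1)
    else
      let m := PySem.List.pyGetD arr_m (PySem.List.pyGetD a i 0 - 1) 0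
      if cur < m then false else checkLoop2 rest a arr_m (cur - m)

def check (arr : List Int) (arr_m : List Int) (last : Int) : Bool :=
  let r := checkLoop1 (PySem.List.pyRange 0 (last + 1) 1) arr PySem.Dict.empty
  checkLoop2 (PySem.List.pyRange 0 (last + 1) 1) r.1 arr_m 0

-- ===== PORT B =====
-- last_occ dict: for i in range(last+1): if arr[i] != 0: last_occ[arr[i]] = i
def bDict (arr : List Int) (idxs : List Int) (d : PySem.Dict Int Int) : PySem.Dict Int Int :=
  match idxs with
  | [] => d
  | i :: rest =>
    if PySem.List.pyGetD arr i 0 ≠ 0 then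
      bDict arr rest (d.insert (PySem.List.pyGetD arr i 0) i)
    else bDict arr rest d

-- for k, (pos, v) in enumerate(sorted(…)): need += arr_m[v-1]; if pos - k < need: return False
def bGo (exams : List (Int × Int)) (arr_m : List Int) (k need : Int) : Bool :=
  match exams with
  | [] => true
  | (pos, v) :: rest =>
    let need' := need + PySem.List.pyGetD arr_m (v - 1) 0
    if pos - k < need' then false else bGo rest arr_m (k + 1) need'

def check_alt (arr : List Int) (arr_m : List Int) (last : Int) : Bool :=
  let d := bDict arr (PySem.List.pyRange 0 (last + 1) 1) PySem.Dict.empty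
  -- Python sorts the (i, v) tuples lexicographically; the first components (dict values,
  -- distinct last-occurrence indices) are pairwise distinct, so sorting by the first
  -- component alone is exact here
  bGo (PySem.List.sorted (d.items.map (fun p => (p.2, p.1))) (fun p => p.1) false) arr_m 0 0

-- ===== PRECONDITION & SPEC =====
-- Pre_check excludes the inputs where Python raises IndexError: an index 0..last off the end of arr,
-- or a nonzero entry in arr[0:last+1] that is not a valid (possibly negative) Python index into arr_m
-- after subtracting 1. This also excludes some inputs where A happens to return False early, before
-- reaching the out-of-range access; both programs return False there alike.
def Pre_check (arr : List Int) (arr_m : List Int) (last : Int) : Prop :=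
  last < (arr.length : Int) ∧
    ∀ v ∈ arr.take (last + 1).toNat, v ≠ 0 → (1 - (arr_m.length : Int) ≤ v ∧ v ≤ (arr_m.length : Int))
instance (arr : List Int) (arr_m : List Int) (last : Int) : Decidable (Pre_check arr arr_m last) := by
  unfold Pre_check; infer_instance

def pvWitness_check : List Int × List Int × Int := ([2, 0, 1, 2], [1, 2], 3)

def Spec_check (arr : List Int) (arr_m : List Int) (last : Int) (out : Bool) : Prop := out = check_alt arr arr_m last
instance (arr : List Int) (arr_m : List Int) (last : Int) (out : Bool) : Decidable (Spec_check arr arr_m last out) := by unfold Spec_check; infer_instance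

-- ===== CLAIM (what is proved, stated in full; the proofs are below) =====
def Claim_equal_check : Prop := ∀ (arr : List Int) (arr_m : List Int) (last : Int), Dom_check arr arr_m last → Pre_check arr arr_m last → Spec_check arr arr_m last (check arr arr_m last)

-- ===== LEMMAS AND PROOFS =====

-- the last occurrence of a value present in a prefix exists
theorem exists_last_occ (arr : List Int) (v : Int) (j : Nat)
    (h : ∃ k : Nat, k < j ∧ arr.getD k 0 = v) :
    ∃ k : Nat, k < j ∧ arr.getD k 0 = v ∧ ∀ t : Nat, k < t → t < j → arr.getD t 0 ≠ v := by
  induction j with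
  | zero => omega
  | succ j ih =>
    by_cases hj : arr.getD j 0 = v
    · exact ⟨j, by omega, hj, fun t ht1 ht2 => by omega⟩
    · obtain ⟨k, hk, hkv⟩ := h
      have hkj : k < j := by
        rcases Nat.lt_succ_iff_lt_or_eq.mp hk with h' | h'
        · exact h'
        · exact absurd (h' ▸ hkv) hj
      obtain ⟨k', hk', hk'v, hk'last⟩ := ih ⟨k, hkj, hkv⟩
      refine ⟨k', by omega, hk'v, fun t ht1 ht2 => ?_⟩
      by_cases htj : t < j
      · exact hk'last t ht1 htj
      · have : t = j := by omega
        subst this; exact hj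

-- chaining lemma for A's first loop
theorem checkLoop1_append (xs ys : List Int) (a : List Int) (d : PySem.Dict Int Int) :
    checkLoop1 (xs ++ ys) a d =
      checkLoop1 ys (checkLoop1 xs a d).1 (checkLoop1 xs a d).2 := by
  induction xs generalizing a d with
  | nil => simp [checkLoop1]
  | cons i rest ih =>
    simp only [List.cons_append, checkLoop1]
    split_ifs <;> simp [ih]

-- invariant of A's first loop over range(0, j)
theorem checkLoop1_spec (arr : List Int) (j : Nat) :
    ((checkLoop1 (PySem.List.pyRange 0 (j : Int) 1) arr PySem.Dict.empty).1.length = arr.length) ∧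
    (∀ k : Nat, j ≤ k →
      (checkLoop1 (PySem.List.pyRange 0 (j : Int) 1) arr PySem.Dict.empty).1.getD k 0 = arr.getD k 0) ∧
    (∀ k : Nat, k < j →
      ((arr.getD k 0 ≠ 0 ∧ ∀ t : Nat, k < t → t < j → arr.getD t 0 ≠ arr.getD k 0) →
        (checkLoop1 (PySem.List.pyRange 0 (j : Int) 1) arr PySem.Dict.empty).1.getD k 0 = arr.getD k 0) ∧
      (¬ (arr.getD k 0 ≠ 0 ∧ ∀ t : Nat, k < t → t < j → arr.getD t 0 ≠ arr.getD k 0) →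
        (checkLoop1 (PySem.List.pyRange 0 (j : Int) 1) arr PySem.Dict.empty).1.getD k 0 = 0)) ∧
    (∀ v x : Int,
      (checkLoop1 (PySem.List.pyRange 0 (j : Int) 1) arr PySem.Dict.empty).2.get? v = some x ↔
        (v ≠ 0 ∧ ∃ k : Nat, x = (k : Int) ∧ k < j ∧ arr.getD k 0 = v ∧
          ∀ t : Nat, k < t → t < j → arr.getD t 0 ≠ v)) := by
  induction j with
  | zero =>
    rw [Nat.cast_zero, PySem.List.pyRange_one_eq_nil (by omega)]
    refine ⟨rfl, fun k _ => rfl, fun k hk => by omega, fun v x => ?_⟩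
    simp only [checkLoop1, PySem.Dict.get?_empty]
    constructor
    · intro h; cases h
    · rintro ⟨_, k, _, hk, _⟩; omega
  | succ j ih =>
    obtain ⟨ih1, ih2, ih3, ih4⟩ := ih
    have hcast : ((j + 1 : Nat) : Int) = (j : Int) + 1 := by push_cast; ring
    rw [hcast, PySem.List.pyRange_one_succ_right (by exact_mod_cast j.zero_le), checkLoop1_append]
    set p := checkLoop1 (PySem.List.pyRange 0 (j : Int) 1) arr PySem.Dict.empty with hp
    have hvj : PySem.List.pyGetD p.1 ((j : Nat) : Int) 0 = arr.getD j 0 := by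
      simp only [PySem.List.pyGetD_natCast]
      exact ih2 j (le_refl j)
    have hext : ∀ (k : Nat) (v : Int), arr.getD j 0 ≠ v →
        ((∀ t : Nat, k < t → t < j + 1 → arr.getD t 0 ≠ v) ↔
          (∀ t : Nat, k < t → t < j → arr.getD t 0 ≠ v)) := by
      intro k v hne
      constructor
      · intro h t ht1 ht2; exact h t ht1 (by omega)
      · intro h t ht1 ht2
        by_cases htj : t < j
        · exact h t ht1 htj
        · have : t = j := by omega
          subst this; exact hne
    simp only [checkLoop1, hvj]
    by_cases h0 : arr.getD j 0 = 0
    · rw [if_neg (by rw [h0]; simp)]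
      refine ⟨ih1, fun k hk => ih2 k (by omega), fun k hk => ?_, fun v x => ?_⟩
      · by_cases hkj : k < j
        · have hne : arr.getD j 0 ≠ arr.getD k 0 ∨ arr.getD k 0 = 0 := by
            by_cases hz : arr.getD k 0 = 0
            · exact Or.inr hz
            · exact Or.inl (by rw [h0]; exact fun he => hz he.symm)
          rcases hne with hne | hz
          · exact ⟨fun ⟨ha, hb⟩ => (ih3 k hkj).1 ⟨ha, (hext k _ hne).mp hb⟩,
              fun hn => (ih3 k hkj).2 (fun ⟨ha, hb⟩ => hn ⟨ha, (hext k _ hne).mpr hb⟩)⟩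
          · exact ⟨fun ⟨ha, _⟩ => absurd hz ha, fun _ => (ih3 k hkj).2 (fun ⟨ha, _⟩ => ha hz)⟩
        · have : k = j := by omega
          subst this
          exact ⟨fun ⟨ha, _⟩ => absurd h0 ha, fun _ => by rw [ih2 k (le_refl k)]; exact h0⟩
      · rw [ih4 v x]
        constructor
        · rintro ⟨hv, k, hx, hk, hval, hlast⟩
          refine ⟨hv, k, hx, by omega, hval, ?_⟩
          rw [hext k v (by rw [h0]; exact fun he => hv he.symm)]
          exact hlast
        · rintro ⟨hv, k, hx, hk, hval, hlast⟩
          have hkj : k < j := by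
            rcases Nat.lt_succ_iff_lt_or_eq.mp hk with h | h
            · exact h
            · exfalso; subst h; exact hv (hval.symm.trans h0)
          refine ⟨hv, k, hx, hkj, hval, ?_⟩
          rw [← hext k v (by rw [h0]; exact fun he => hv he.symm)]
          exact hlast
    · rw [if_pos h0]
      -- occurrences of arr.getD j 0 strictly before j force the dict to hold its last occurrence
      have hocc : ∀ w : Int, w ≠ 0 → (∃ k : Nat, k < j ∧ arr.getD k 0 = w) →
          ∃ x : Int, p.2.get? w = some x := by
        intro w hw hex
        obtain ⟨k, hk, hkval, hklast⟩ := exists_last_occ arr w j hex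
        exact ⟨(k : Int), (ih4 w (k : Int)).mpr ⟨hw, k, rfl, hk, hkval, hklast⟩⟩
      rcases hdj : p.2.get? (arr.getD j 0) with _ | x
      · -- no earlier occurrence of arr.getD j 0
        have hnone : ∀ k : Nat, k < j → arr.getD k 0 ≠ arr.getD j 0 := by
          intro k hk he
          obtain ⟨x, hx⟩ := hocc (arr.getD j 0) h0 ⟨k, hk, he⟩
          rw [hdj] at hx; cases hx
        refine ⟨ih1, fun k hk => ih2 k (by omega), fun k hk => ?_, fun v x => ?_⟩
        · by_cases hkj : k < j
          · have hne : arr.getD j 0 ≠ arr.getD k 0 := fun he => hnone k hkj he.symm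
            exact ⟨fun ⟨ha, hb⟩ => (ih3 k hkj).1 ⟨ha, (hext k _ hne).mp hb⟩,
              fun hn => (ih3 k hkj).2 (fun ⟨ha, hb⟩ => hn ⟨ha, (hext k _ hne).mpr hb⟩)⟩
          · have : k = j := by omega
            subst this
            refine ⟨fun _ => ih2 k (le_refl k), fun hn => ?_⟩
            exact absurd ⟨h0, fun t ht1 ht2 => by omega⟩ hn
        · rw [PySem.Dict.get?_insert]
          split_ifs with hv
          · subst hv
            constructor
            · rintro h
              injection h with h
              exact ⟨h0, j, h.symm, by omega, rfl, fun t ht1 ht2 => by omega⟩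
            · rintro ⟨hv, k, hx, hk, hval, hlast⟩
              have : k = j := by
                by_contra hne
                exact hlast j (by omega) (by omega) rfl
              subst this; rw [hx]
          · rw [ih4 v x]
            have hne : arr.getD j 0 ≠ v := fun he => hv he.symm
            constructor
            · rintro ⟨hv', k, hx, hk, hval, hlast⟩
              exact ⟨hv', k, hx, by omega, hval, (hext k v hne).mpr hlast⟩
            · rintro ⟨hv', k, hx, hk, hval, hlast⟩
              have hkj : k < j := by
                rcases Nat.lt_succ_iff_lt_or_eq.mp hk with h | h
                · exact h
                · exfalso; subst h; exact hne hval
              exact ⟨hv', k, hx, hkj, hval, (hext k v hne).mp hlast⟩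
      · -- x is the last earlier occurrence: zero it out
        obtain ⟨_, k0, hx0, hk0, hk0val, hk0last⟩ := (ih4 (arr.getD j 0) x).mp hdj
        simp only []
        have hk0len : k0 < arr.length := by
          by_contra hge
          rw [List.getD_eq_default _ _ (by omega)] at hk0val
          exact h0 hk0val.symm
        have hk0len' : k0 < p.1.length := by rw [ih1]; exact hk0len
        have hset : ∀ m : Nat, (PySem.List.pySetD p.1 x 0).getD m 0 =
            if m = k0 then 0 else p.1.getD m 0 := by
          intro m
          rw [hx0, PySem.List.pySetD_natCast]
          rcases eq_or_ne m k0 with h | h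
          · subst h; simp [List.getD_eq_getElem?_getD, hk0len']
          · rw [if_neg h]
            simp only [List.getD_eq_getElem?_getD]
            rw [List.getElem?_set_ne (fun he => h he.symm)]
        refine ⟨by rw [hx0, PySem.List.pySetD_natCast, List.length_set]; exact ih1,
          fun k hk => ?_, fun k hk => ?_, fun v x' => ?_⟩
        · rw [hset k, if_neg (by omega)]
          exact ih2 k (by omega)
        · by_cases hkj : k < j
          · rcases eq_or_ne k k0 with hkk0 | hkk0
            · subst hkk0
              constructor
              · rintro ⟨_, hlast⟩
                exact absurd (hk0val ▸ hlast j (by omega) (by omega)) (fun h => h rfl)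
              · intro _
                rw [hset k, if_pos rfl]
            · rw [hset k, if_neg hkk0]
              by_cases hsame : arr.getD k 0 = arr.getD j 0
              · -- an earlier occurrence of the same value, already zeroed (k0 is the last one)
                have hkval : arr.getD k0 0 = arr.getD k 0 := hk0val.trans hsame.symm
                have hkk0lt : k < k0 := by
                  rcases Nat.lt_or_ge k k0 with h | h
                  · exact h
                  · have hkk0' : k0 < k := by omega
                    exact absurd hsame (hk0last k hkk0' hkj)
                have hfail : ¬ (arr.getD k 0 ≠ 0 ∧ ∀ t : Nat, k < t → t < j → arr.getD t 0 ≠ arr.getD k 0) := by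
                  rintro ⟨_, hlast⟩
                  exact hlast k0 hkk0lt hk0 hkval
                refine ⟨fun ⟨ha, hlast⟩ => absurd hkval (hlast k0 (by omega) (by omega)), fun _ => (ih3 k hkj).2 hfail⟩
              · have hne : arr.getD j 0 ≠ arr.getD k 0 := fun he => hsame he.symm
                exact ⟨fun ⟨ha, hb⟩ => (ih3 k hkj).1 ⟨ha, (hext k _ hne).mp hb⟩,
                  fun hn => (ih3 k hkj).2 (fun ⟨ha, hb⟩ => hn ⟨ha, (hext k _ hne).mpr hb⟩)⟩
          · have : k = j := by omega
            subst this
            refine ⟨fun _ => ?_, fun hn => absurd ⟨h0, fun t ht1 ht2 => by omega⟩ hn⟩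
            rw [hset k, if_neg (by omega)]
            exact ih2 k (le_refl k)
        · rw [PySem.Dict.get?_insert]
          split_ifs with hv
          · subst hv
            constructor
            · rintro h
              injection h with h
              exact ⟨h0, j, h.symm, by omega, rfl, fun t ht1 ht2 => by omega⟩
            · rintro ⟨hv, k, hx, hk, hval, hlast⟩
              have : k = j := by
                by_contra hne
                exact hlast j (by omega) (by omega) rfl
              subst this; rw [hx]
          · rw [ih4 v x']
            have hne : arr.getD j 0 ≠ v := fun he => hv he.symm
            constructor
            · rintro ⟨hv', k, hx, hk, hval, hlast⟩
              exact ⟨hv', k, hx, by omega, hval, (hext k v hne).mpr hlast⟩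
            · rintro ⟨hv', k, hx, hk, hval, hlast⟩
              have hkj : k < j := by
                rcases Nat.lt_succ_iff_lt_or_eq.mp hk with h | h
                · exact h
                · exfalso; subst h; exact hne hval
              exact ⟨hv', k, hx, hkj, hval, (hext k v hne).mp hlast⟩

-- B's dict loop computes the same dict as A's first loop: the reads A makes come from
-- positions not yet zeroed (every stored index is below the next loop index)
theorem dict_eq (arr : List Int) (n : Int) : ∀ fuel : Nat, ∀ (j : Int) (a : List Int) (d : PySem.Dict Int Int),
    fuel = (n - j).toNat → 0 ≤ j →
    (∀ k : Int, j ≤ k → PySem.List.pyGetD a k 0 = PySem.List.pyGetD arr k 0) →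
    (∀ v x : Int, d.get? v = some x → 0 ≤ x ∧ x < j) →
    (checkLoop1 (PySem.List.pyRange j n 1) a d).2 = bDict arr (PySem.List.pyRange j n 1) d := by
  intro fuel
  induction fuel with
  | zero =>
    intro j a d hf hj _ _
    rw [PySem.List.pyRange_one_eq_nil (by omega)]
    rfl
  | succ m ih =>
    intro j a d hf hj hagree hd
    by_cases hjn : j < n
    · rw [PySem.List.pyRange_one_cons hjn]
      have hread : PySem.List.pyGetD a j 0 = PySem.List.pyGetD arr j 0 := hagree j (le_refl j)
      simp only [checkLoop1, bDict, hread]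
      by_cases hz : PySem.List.pyGetD arr j 0 ≠ 0
      · rw [if_pos hz, if_pos hz]
        have hd' : ∀ v x : Int, (d.insert (PySem.List.pyGetD arr j 0) j).get? v = some x → 0 ≤ x ∧ x < j + 1 := by
          intro v x hvx
          rw [PySem.Dict.get?_insert] at hvx
          split_ifs at hvx with he
          · injection hvx with hvx; omega
          · have := hd v x hvx; omega
        rcases hget : d.get? (PySem.List.pyGetD arr j 0) with _ | x
        · simp only []
          exact ih (j + 1) a _ (by omega) (by omega)
            (fun k hk => hagree k (by omega)) hd'
        · simp only []
          obtain ⟨hx0, hxj⟩ := hd _ _ hget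
          refine ih (j + 1) (PySem.List.pySetD a x 0) _ (by omega) (by omega) (fun k hk => ?_) hd'
          have hxk : x ≠ k := by omega
          rw [← hagree k (by omega)]
          rw [PySem.List.pySetD_of_nonneg a 0 hx0]
          have hkk : k = ((k.toNat : Nat) : Int) := by omega
          rw [hkk]
          simp only [PySem.List.pyGetD_natCast, List.getD_eq_getElem?_getD]
          rw [List.getElem?_set_ne (by omega)]
      · rw [if_neg hz, if_neg hz]
        exact ih (j + 1) a d (by omega) (by omega) (fun k hk => hagree k (by omega))
          (fun v x hvx => by have := hd v x hvx; omega)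
    · rw [PySem.List.pyRange_one_eq_nil (by omega)]
      rfl

-- keys stay unique through B's insert loop
theorem bDict_nodup (arr : List Int) (idxs : List Int) :
    ∀ d : PySem.Dict Int Int, d.keys.Nodup → (bDict arr idxs d).keys.Nodup := by
  induction idxs with
  | nil => intro d hd; exact hd
  | cons i rest ih =>
    intro d hd
    simp only [bDict]
    split_ifs
    · exact ih _ (PySem.Dict.nodup_keys_insert d _ _ hd)
    · exact ih d hd

-- the effective exams (nonzero entries of A's zeroed copy), in position order
def Leff (a : List Int) (j n : Int) : List (Int × Int) :=
  (PySem.List.pyRange j n 1).filterMap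
    (fun i => if PySem.List.pyGetD a i 0 ≠ 0 then some (i, PySem.List.pyGetD a i 0) else none)

-- A's simulation with free days equals B's cumulative-need check over the effective exams:
-- the accumulator satisfies cur = j - k - need throughout
theorem sim (a arr_m : List Int) (n : Int) : ∀ fuel : Nat, ∀ (j k need cur : Int),
    fuel = (n - j).toNat → cur = j - k - need →
    checkLoop2 (PySem.List.pyRange j n 1) a arr_m cur = bGo (Leff a j n) arr_m k need := by
  intro fuel
  induction fuel with
  | zero =>
    intro j k need cur hf _
    rw [Leff, PySem.List.pyRange_one_eq_nil (by omega)]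
    rfl
  | succ m ih =>
    intro j k need cur hf hcur
    by_cases hjn : j < n
    · by_cases hz : PySem.List.pyGetD a j 0 ≠ 0
      · have hsome : (fun i => if PySem.List.pyGetD a i 0 ≠ 0 then
            some (i, PySem.List.pyGetD a i 0) else none) j = some (j, PySem.List.pyGetD a j 0) := by
          simp only [if_pos hz]
        rw [Leff, PySem.List.pyRange_one_cons hjn,
          List.filterMap_cons_some (f := fun i => if PySem.List.pyGetD a i 0 ≠ 0 then
            some (i, PySem.List.pyGetD a i 0) else none) hsome]
        simp only [checkLoop2, bGo, if_neg (by exact fun h => hz h)]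
        have hiff : cur < PySem.List.pyGetD arr_m (PySem.List.pyGetD a j 0 - 1) 0 ↔
            j - k < need + PySem.List.pyGetD arr_m (PySem.List.pyGetD a j 0 - 1) 0 := by omega
        by_cases hfail : cur < PySem.List.pyGetD arr_m (PySem.List.pyGetD a j 0 - 1) 0
        · rw [if_pos hfail, if_pos (hiff.mp hfail)]
        · rw [if_neg hfail, if_neg (fun h => hfail (hiff.mpr h))]
          rw [← Leff]
          exact ih (j + 1) (k + 1) (need + PySem.List.pyGetD arr_m (PySem.List.pyGetD a j 0 - 1) 0)
            _ (by omega) (by omega)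
      · have hz' : PySem.List.pyGetD a j 0 = 0 := by
          by_contra h; exact hz h
        have hnone : (fun i => if PySem.List.pyGetD a i 0 ≠ 0 then
            some (i, PySem.List.pyGetD a i 0) else none) j = none := by
          simp only [if_neg hz]
        rw [Leff, PySem.List.pyRange_one_cons hjn,
          List.filterMap_cons_none (f := fun i => if PySem.List.pyGetD a i 0 ≠ 0 then
            some (i, PySem.List.pyGetD a i 0) else none) hnone]
        simp only [checkLoop2, if_pos hz']
        rw [← Leff]
        exact ih (j + 1) k need (cur + 1) (by omega) (by omega)
    · rw [Leff, PySem.List.pyRange_one_eq_nil (by omega)]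
      rfl

-- ===== VERDICT (by name: the statement is the Claim_ definition above) =====
theorem check_spec : Claim_equal_check := by
  intro arr arr_m last _ _
  unfold Spec_check check check_alt
  show checkLoop2 (PySem.List.pyRange 0 (last + 1) 1)
      (checkLoop1 (PySem.List.pyRange 0 (last + 1) 1) arr PySem.Dict.empty).1 arr_m 0 =
    bGo (PySem.List.sorted
      ((bDict arr (PySem.List.pyRange 0 (last + 1) 1) PySem.Dict.empty).items.map
        (fun p => (p.2, p.1))) (fun p => p.1) false) arr_m 0 0
  by_cases hl : last + 1 ≤ 0
  · rw [PySem.List.pyRange_one_eq_nil (by omega)]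
    rfl
  · set n : Int := last + 1 with hn
    have hn0 : 0 < n := by omega
    set N : Nat := n.toNat with hN
    have hNn : ((N : Nat) : Int) = n := by omega
    obtain ⟨h1, h2, h3, h4⟩ := checkLoop1_spec arr N
    rw [hNn] at h1 h2 h3 h4
    set a : List Int := (checkLoop1 (PySem.List.pyRange 0 n 1) arr PySem.Dict.empty).1 with ha
    set dA : PySem.Dict Int Int := (checkLoop1 (PySem.List.pyRange 0 n 1) arr PySem.Dict.empty).2 with hdA
    -- the dicts agree
    have hdicts : dA = bDict arr (PySem.List.pyRange 0 n 1) PySem.Dict.empty := by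
      exact dict_eq arr n (n - 0).toNat 0 arr PySem.Dict.empty rfl (le_refl 0)
        (fun k _ => rfl) (fun v x h => by rw [PySem.Dict.get?_empty] at h; cases h)
    have hnd : dA.keys.Nodup := by
      rw [hdicts]
      exact bDict_nodup arr _ PySem.Dict.empty (by
        have : (PySem.Dict.empty : PySem.Dict Int Int).keys = [] := PySem.Dict.keys_empty
        rw [this]; exact List.nodup_nil)
    -- the sorted exam list is exactly Leff a 0 n
    have hmem : ∀ p : Int × Int, p ∈ dA.items.map (fun p => (p.2, p.1)) ↔ p ∈ Leff a 0 n := by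
      intro ⟨pos, v⟩
      constructor
      · intro hp
        simp only [List.mem_map] at hp
        obtain ⟨⟨qa, qb⟩, hq, he⟩ := hp
        obtain ⟨hb, hav⟩ := Prod.ext_iff.mp he
        simp only at hb hav
        rw [hb, hav] at hq
        have hget : dA.get? v = some pos := (PySem.Dict.get?_eq_some_iff_mem_items dA v pos hnd).mpr hq
        obtain ⟨hv0, k, hx, hk, hval, hlastocc⟩ := (h4 v pos).mp hget
        rw [Leff, List.mem_filterMap]
        refine ⟨pos, ?_, ?_⟩
        · rw [PySem.List.mem_pyRange_one]; omega
        · have hcond : arr.getD k 0 ≠ 0 ∧ ∀ t : Nat, k < t → t < N → arr.getD t 0 ≠ arr.getD k 0 := by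
            rw [hval]; exact ⟨hv0, fun t h1' h2' => hlastocc t h1' h2'⟩
          have hak : a.getD k 0 = arr.getD k 0 := (h3 k hk).1 hcond
          rw [hx]
          simp only [PySem.List.pyGetD_natCast, hak, hval]
          rw [if_pos hv0]
      · intro hp
        rw [Leff, List.mem_filterMap] at hp
        obtain ⟨i, hi, hcond⟩ := hp
        rw [PySem.List.mem_pyRange_one] at hi
        obtain ⟨hi1, hi2⟩ := hi
        split_ifs at hcond with hnz
        · injection hcond with hc
          obtain ⟨hc1, hc2⟩ := Prod.ext_iff.mp hc
          simp only at hc1 hc2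
          subst hc1
          set k : Nat := i.toNat with hk
          have hpk : i = ((k : Nat) : Int) := by omega
          rw [hpk] at hnz hc2
          simp only [PySem.List.pyGetD_natCast] at hnz hc2
          have hkN : k < N := by omega
          have hcond' : arr.getD k 0 ≠ 0 ∧ ∀ t : Nat, k < t → t < N → arr.getD t 0 ≠ arr.getD k 0 := by
            by_contra hnc
            exact hnz ((h3 k hkN).2 hnc)
          have hak : a.getD k 0 = arr.getD k 0 := (h3 k hkN).1 hcond'
          have hget : dA.get? v = some i := by
            apply (h4 v i).mpr
            exact ⟨by rw [← hc2, hak]; exact hcond'.1, k, hpk, hkN,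
              by rw [← hc2, hak], by rw [← hc2, hak]; exact hcond'.2⟩
          have hitems : (v, i) ∈ dA.items := PySem.Dict.mem_items_of_get?_eq_some dA hget
          simp only [List.mem_map]
          exact ⟨(v, i), hitems, rfl⟩
    have hpair : (Leff a 0 n).Pairwise (fun p q : Int × Int => p.1 < q.1) := by
      rw [Leff]
      apply List.pairwise_filterMap.mpr
      apply List.Pairwise.imp ?_ (PySem.List.pairwise_lt_pyRange_one 0 n)
      intro i i' hlt p hp q hq
      split_ifs at hp hq
      · injection hp with hp1; injection hq with hq1
        rw [← hp1, ← hq1]; exact hlt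
    have hnodupL : (Leff a 0 n).Nodup := hpair.imp (fun h => by
      intro he; rw [he] at h; exact lt_irrefl _ h)
    have hnodupM : (dA.items.map (fun p => (p.2, p.1))).Nodup := by
      apply List.Nodup.map
      · intro p q hpq
        obtain ⟨h1', h2'⟩ := Prod.ext_iff.mp hpq
        exact Prod.ext h2' h1'
      · have hfst : dA.items.map (·.1) = dA.keys := rfl
        exact (List.Nodup.of_map (f := (·.1)) (hfst ▸ hnd))
    have hperm : (Leff a 0 n).Perm (dA.items.map (fun p => (p.2, p.1))) := by
      rw [List.perm_ext_iff_of_nodup hnodupL hnodupM]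
      intro p; exact (hmem p).symm
    have hsorted : PySem.List.sorted (dA.items.map (fun p => (p.2, p.1))) (fun p => p.1) false
        = Leff a 0 n :=
      PySem.List.sorted_eq_of_perm_of_pairwise_lt _ _ _ hperm hpair
    rw [← hdicts, hsorted]
    exact sim a arr_m n (n - 0).toNat 0 0 0 0 rfl (by omega)
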